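-- pv_equiv track=rewrite | github.com/red-hat-data-services/Cloud-Cost-Optimization | src/cloud_cleaner.py | elb_belongs_to_existing_cluster
-- ===== SOURCE A (Python) =====
-- def name_starts_with_existing_cluster(name, cluster_names:list[str]):
--     result = False
--     for cluster_name in cluster_names:
--         if name.startswith(f'{cluster_name}-'):
--             result = True
--             break
--     return result
--
-- def elb_belongs_to_existing_cluster( cluster_names:list[str], tags:dict):
--     result = False
--
--     if 'Name' in tags:
--         result = name_starts_with_existing_cluster(tags['Name'], cluster_names)
--
--     if not result:
--         for key, value in tags.items():
--             if key.startswith('kubernetes.io/cluster/'):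
--                 possible_cluster_suffix = key.split('/')[-1]
--                 result = name_starts_with_existing_cluster(possible_cluster_suffix, cluster_names)
--                 if result:
--                     break
--
--
--     return result
-- ===== SOURCE B (Python) =====
-- def elb_belongs_to_existing_cluster(cluster_names: list[str], tags: dict):
--     names = set(cluster_names)
--
--     def has_cluster_prefix(candidate):
--         # candidate starts with some cluster name followed by '-' iff it has a
--         # dash whose preceding prefix is one of the known cluster names
--         return any(ch == '-' and candidate[:i] in names
--                    for i, ch in enumerate(candidate))
--
--     if 'Name' in tags and has_cluster_prefix(tags['Name']):
--         return True
--     return any(key.startswith('kubernetes.io/cluster/')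
--                and has_cluster_prefix(key.split('/')[-1])
--                for key in tags)
-- ===== Notes on version B (the rewrite author's own statement) =====
-- stated objective: alternative
-- what changed: Inverts the prefix test: instead of scanning cluster_names per candidate with startswith, B hashes cluster_names into a set once and, for each candidate, walks its dash positions checking whether the prefix before the dash is in the set, so the inner scan over cluster_names disappears.
import Mathlib
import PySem

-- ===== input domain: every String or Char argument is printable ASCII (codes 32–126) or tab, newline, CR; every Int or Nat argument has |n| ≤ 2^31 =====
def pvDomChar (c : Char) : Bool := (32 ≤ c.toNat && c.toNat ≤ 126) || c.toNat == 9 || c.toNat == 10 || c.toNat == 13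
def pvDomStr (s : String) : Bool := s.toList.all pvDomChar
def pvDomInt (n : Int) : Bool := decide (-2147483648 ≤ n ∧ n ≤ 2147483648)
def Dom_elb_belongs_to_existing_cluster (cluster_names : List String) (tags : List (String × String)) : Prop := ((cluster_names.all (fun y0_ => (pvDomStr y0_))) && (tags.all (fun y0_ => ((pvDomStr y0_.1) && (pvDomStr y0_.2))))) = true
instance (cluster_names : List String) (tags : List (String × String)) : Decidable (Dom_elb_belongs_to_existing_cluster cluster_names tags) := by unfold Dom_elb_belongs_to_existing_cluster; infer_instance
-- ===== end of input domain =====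

-- B inverts the prefix test: cluster_names go into a set once, and each candidate is checked by walking
-- its dash positions and looking the preceding prefix up in that set — no scan over cluster_names per candidate.
-- ===== PORT A =====
-- helper: name_starts_with_existing_cluster with its break-on-first-match loop
def name_starts_with_existing_cluster (name : String) (cluster_names : List String) : Bool :=
  match cluster_names with
  | [] => false
  | cn :: rest =>
    if PySem.Str.startswith name (cn ++ "-") then true
    else name_starts_with_existing_cluster name rest

-- key.split('/')[-1]; split? with a nonempty separator is always `some` of a nonempty list, so both defaults are unreachable
def pvLastPiece (key : String) : String :=
  (PySem.List.pyGet? ((PySem.Str.split? key "/").getD []) (-1)).getD ""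

-- A's second loop, with its break
def pvElbLoop (cluster_names : List String) (items : List (String × String)) : Bool :=
  match items with
  | [] => false
  | (key, _) :: rest =>
    if PySem.Str.startswith key "kubernetes.io/cluster/" then
      if name_starts_with_existing_cluster (pvLastPiece key) cluster_names then true
      else pvElbLoop cluster_names rest
    else pvElbLoop cluster_names rest

def elb_belongs_to_existing_cluster (cluster_names : List String) (tags : List (String × String)) : Bool :=
  let result :=
    match tags.lookup "Name" with
    | some v => name_starts_with_existing_cluster v cluster_names
    | none => false
  if !result then pvElbLoop cluster_names tags else result

-- ===== PORT B =====
-- has_cluster_prefix: candidate[:i] is candidate.toList.take-style slicing; enumerate gives (index, char)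
def pvHasClusterPrefix (names : PySem.Set String) (candidate : String) : Bool :=
  (PySem.List.enumerate candidate.toList).any (fun p =>
    p.2 == '-' &&
    PySem.Set.contains names (String.ofList (PySem.List.slice candidate.toList none (some p.1))))

def elb_belongs_to_existing_cluster_alt (cluster_names : List String) (tags : List (String × String)) : Bool :=
  let names := PySem.Set.ofList cluster_names
  match tags.lookup "Name" with
  | some v =>
    if pvHasClusterPrefix names v then true
    else tags.any (fun kv =>
      PySem.Str.startswith kv.1 "kubernetes.io/cluster/" &&
      pvHasClusterPrefix names ((PySem.List.pyGet? ((PySem.Str.split? kv.1 "/").getD []) (-1)).getD ""))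
  | none => tags.any (fun kv =>
      PySem.Str.startswith kv.1 "kubernetes.io/cluster/" &&
      pvHasClusterPrefix names ((PySem.List.pyGet? ((PySem.Str.split? kv.1 "/").getD []) (-1)).getD ""))

-- ===== PRECONDITION & SPEC =====
def Spec_elb_belongs_to_existing_cluster (cluster_names : List String) (tags : List (String × String)) (out : Bool) : Prop := out = elb_belongs_to_existing_cluster_alt cluster_names tags
instance (cluster_names : List String) (tags : List (String × String)) (out : Bool) : Decidable (Spec_elb_belongs_to_existing_cluster cluster_names tags out) := by unfold Spec_elb_belongs_to_existing_cluster; infer_instance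

-- ===== CLAIM =====
def Claim_equal_elb_belongs_to_existing_cluster : Prop := ∀ (cluster_names : List String) (tags : List (String × String)), Dom_elb_belongs_to_existing_cluster cluster_names tags → Spec_elb_belongs_to_existing_cluster cluster_names tags (elb_belongs_to_existing_cluster cluster_names tags)

-- ===== LEMMAS AND PROOFS =====
theorem nswec_eq_any (name : String) (cns : List String) :
    name_starts_with_existing_cluster name cns
      = cns.any (fun cn => PySem.Str.startswith name (cn ++ "-")) := by
  induction cns with
  | nil => rfl
  | cons cn rest ih =>
    simp only [name_starts_with_existing_cluster, List.any_cons, ih]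
    cases h : PySem.Str.startswith name (cn ++ "-") <;> simp

-- the central fact: the dash-position / set-lookup test equals the startswith scan over cluster_names
theorem hasClusterPrefix_eq (cns : List String) (c : String) :
    pvHasClusterPrefix (PySem.Set.ofList cns) c
      = cns.any (fun cn => PySem.Str.startswith c (cn ++ "-")) := by
  rw [Bool.eq_iff_iff]
  unfold pvHasClusterPrefix
  simp only [List.any_eq_true, PySem.List.mem_enumerate_iff, PySem.Set.contains_iff,
    PySem.Set.mem_ofList, Bool.and_eq_true, beq_iff_eq, PySem.Str.startswith_eq,
    PySem.Chars.startswith_iff]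
  constructor
  · rintro ⟨p, ⟨k, hk, rfl⟩, hd, hmem⟩
    refine ⟨String.ofList (PySem.List.slice c.toList none (some ((0:Int) + k))), hmem, ?_⟩
    have hz : (0:Int) + (k:Int) = (k:Int) := by omega
    rw [hz, PySem.List.slice_to_natCast]
    rw [String.toList_append, String.toList_ofList]
    have hd' : c.toList[k] = '-' := hd
    have hstep : c.toList.take k ++ ("-" : String).toList = c.toList.take (k+1) := by
      rw [List.take_add_one]
      simp [List.getElem?_eq_getElem hk, hd']
    rw [hstep]
    exact List.take_prefix _ _
  · rintro ⟨cn, hmem, hpre⟩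
    have hpre' : cn.toList ++ ['-'] <+: c.toList := by
      simpa [String.toList_append] using hpre
    obtain ⟨t, ht⟩ := hpre'
    set k := cn.toList.length with hkdef
    have hk : k < c.toList.length := by
      rw [← ht]; simp [hkdef]
    have hdk? : c.toList[k]? = some '-' := by
      rw [← ht, List.append_assoc, List.getElem?_append_right (by omega)]
      simp [hkdef]
    have hdk : c.toList[k] = '-' := by
      have h1 := List.getElem?_eq_getElem hk
      rw [hdk?] at h1
      exact (Option.some.inj h1).symm
    refine ⟨((0:Int) + k, c.toList[k]), ⟨k, hk, rfl⟩, hdk, ?_⟩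
    · have hz : (0:Int) + (k:Int) = (k:Int) := by omega
      rw [hz, PySem.List.slice_to_natCast]
      have : c.toList.take k = cn.toList := by
        rw [← ht, List.append_assoc]
        exact List.take_left' (by simp [hkdef])
      rw [this]
      simpa using hmem

theorem elbLoop_eq_any (cns : List String) (items : List (String × String)) :
    pvElbLoop cns items
      = items.any (fun kv =>
          PySem.Str.startswith kv.1 "kubernetes.io/cluster/" &&
          name_starts_with_existing_cluster
            ((PySem.List.pyGet? ((PySem.Str.split? kv.1 "/").getD []) (-1)).getD "") cns) := by
  induction items with
  | nil => rfl
  | cons kv rest ih =>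
    obtain ⟨key, v⟩ := kv
    simp only [pvElbLoop, List.any_cons, ih, pvLastPiece]
    cases h1 : PySem.Str.startswith key "kubernetes.io/cluster/" <;>
      cases h2 : name_starts_with_existing_cluster
        ((PySem.List.pyGet? ((PySem.Str.split? key "/").getD []) (-1)).getD "") cns <;>
      simp

-- ===== VERDICT =====
theorem elb_belongs_to_existing_cluster_spec : Claim_equal_elb_belongs_to_existing_cluster := by
  intro cns tags _
  unfold Spec_elb_belongs_to_existing_cluster
  have keyB : ∀ c, pvHasClusterPrefix (PySem.Set.ofList cns) c
      = name_starts_with_existing_cluster c cns := fun c => by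
    rw [hasClusterPrefix_eq, nswec_eq_any]
  unfold elb_belongs_to_existing_cluster elb_belongs_to_existing_cluster_alt
  simp only [keyB, ← elbLoop_eq_any]
  cases h : tags.lookup "Name" with
  | none => simp
  | some v => cases hb : name_starts_with_existing_cluster v cns <;> simp [hb]
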